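-- pv_equiv track=rewrite | github.com/s0urc3k0d/Hackinterface | backend/modules/evilwinrm.py | _parse_mimikatz_output
-- ===== SOURCE A (Python) =====
-- from typing import Dict, Any, List, Optional
--
-- def _parse_mimikatz_output(output: str) -> List[Dict[str, str]]:
--     """Parse la sortie de Mimikatz"""
--     creds = []
--     current_cred = {}
--
--     for line in output.split('\n'):
--         line = line.strip()
--
--         if 'Username' in line and ':' in line:
--             if current_cred:
--                 creds.append(current_cred)
--             current_cred = {'username': line.split(':')[1].strip()}
--         elif 'Domain' in line and ':' in line:
--             current_cred['domain'] = line.split(':')[1].strip()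
--         elif 'NTLM' in line and ':' in line:
--             current_cred['ntlm'] = line.split(':')[1].strip()
--         elif 'Password' in line and ':' in line:
--             pwd = line.split(':')[1].strip()
--             if pwd and pwd != '(null)':
--                 current_cred['password'] = pwd
--
--     if current_cred:
--         creds.append(current_cred)
--
--     return creds
-- ===== SOURCE B (Python) =====
-- from typing import Dict, Any, List, Optional
--
--
-- def _parse_mimikatz_output(output: str) -> List[Dict[str, str]]:
--     """Parse la sortie de Mimikatz (block-partition decomposition)"""
--     lines = [l.strip() for l in output.split('\n')]
--
--     # Phase 1: partition the stripped lines into blocks, starting a new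
--     # block at every Username line; 'done + [cur]' is the block list.
--     done, cur = [], []
--     for line in lines:
--         if 'Username' in line and ':' in line:
--             done.append(cur)
--             cur = [line]
--         else:
--             cur.append(line)
--     blocks = done + [cur]
--
--     # Phase 2: build each block's credential dict independently.
--     def build(block):
--         d = {}
--         for line in block:
--             if 'Username' in line and ':' in line:
--                 d['username'] = line.split(':')[1].strip()
--             elif 'Domain' in line and ':' in line:
--                 d['domain'] = line.split(':')[1].strip()
--             elif 'NTLM' in line and ':' in line:
--                 d['ntlm'] = line.split(':')[1].strip()
--             elif 'Password' in line and ':' in line: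
--                 pwd = line.split(':')[1].strip()
--                 if pwd and pwd != '(null)':
--                     d['password'] = pwd
--         return d
--
--     lead = build(blocks[0])
--     return ([lead] if lead else []) + [build(b) for b in blocks[1:]]
-- ===== Notes on version B (the rewrite author's own statement) =====
-- stated objective: alternative
-- what changed: B replaces A's single streaming fold carrying (creds, current_cred) state by a two-phase decomposition: first partition the stripped lines into blocks at each Username line, then build each block's dict independently, emitting the leading block only when non-empty.
import Mathlib
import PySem

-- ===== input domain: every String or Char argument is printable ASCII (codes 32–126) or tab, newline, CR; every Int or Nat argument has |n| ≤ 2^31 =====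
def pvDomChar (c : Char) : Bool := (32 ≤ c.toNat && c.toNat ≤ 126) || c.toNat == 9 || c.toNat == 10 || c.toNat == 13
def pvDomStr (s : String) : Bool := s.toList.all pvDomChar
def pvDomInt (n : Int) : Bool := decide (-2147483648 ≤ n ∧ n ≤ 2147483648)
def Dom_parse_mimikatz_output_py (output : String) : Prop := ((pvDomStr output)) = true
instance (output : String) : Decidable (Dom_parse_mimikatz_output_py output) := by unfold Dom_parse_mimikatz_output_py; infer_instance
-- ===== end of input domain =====

-- B is an alternative decomposition of A (partition the lines into Username-headed blocks,
-- then build each block's dict independently), same cost; neither mutates its argument.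

-- output.split('\n') / line.split(':'): sep is a non-empty literal, so split? is never none
-- and the getD [] is unreachable — exact there.
def pmSplit (s sep : String) : List String := (PySem.Str.split? s sep).getD []

-- line.split(':')[1].strip() — the same Python line in A and B; under the ':' in line guard
-- the list has a second element, so the getD "" is unreachable — exact there.
def pmField (line : String) : String :=
  PySem.Str.strip ((PySem.List.pyGet? (pmSplit line ":") 1).getD "")

-- 'if pwd and pwd != '(null)': d['password'] = pwd' — the same Python lines in A and B
def pmPwdIf (d : PySem.Dict String String) (pwd : String) : PySem.Dict String String :=
  if pwd ≠ "" ∧ pwd ≠ "(null)" then d.insert "password" pwd else d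

-- ===== PORT A =====
-- the loop body of A, after line = line.strip(): the if/elif chain over (creds, current_cred)
def pmStepACore (st : List (PySem.Dict String String) × PySem.Dict String String)
    (line : String) : List (PySem.Dict String String) × PySem.Dict String String :=
  if PySem.Str.isIn "Username" line && PySem.Str.isIn ":" line then
    ((if st.2.items = [] then st.1 else st.1 ++ [st.2]),
     PySem.Dict.insert PySem.Dict.empty "username" (pmField line))
  else if PySem.Str.isIn "Domain" line && PySem.Str.isIn ":" line then
    (st.1, st.2.insert "domain" (pmField line))
  else if PySem.Str.isIn "NTLM" line && PySem.Str.isIn ":" line then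
    (st.1, st.2.insert "ntlm" (pmField line))
  else if PySem.Str.isIn "Password" line && PySem.Str.isIn ":" line then
    (st.1, pmPwdIf st.2 (pmField line))
  else st

def pmStepA (st : List (PySem.Dict String String) × PySem.Dict String String)
    (raw : String) : List (PySem.Dict String String) × PySem.Dict String String :=
  pmStepACore st (PySem.Str.strip raw)

def parse_mimikatz_output_py (output : String) : List (List (String × String)) :=
  let st := (pmSplit output "\n").foldl pmStepA ([], PySem.Dict.empty)
  (if st.2.items = [] then st.1 else st.1 ++ [st.2]).map PySem.Dict.items

-- ===== PORT B =====
-- 'Username' in line and ':' in line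
def pmIsUser (line : String) : Bool :=
  PySem.Str.isIn "Username" line && PySem.Str.isIn ":" line

-- phase 1 loop body: start a new block at a Username line, else extend the current block
def pmBlockStep (st : List (List String) × List String) (line : String) :
    List (List String) × List String :=
  if pmIsUser line then (st.1 ++ [st.2], [line]) else (st.1, st.2 ++ [line])

-- phase 2 loop body: the same elif chain, on one block's dict
def pmBuildStep (d : PySem.Dict String String) (line : String) : PySem.Dict String String :=
  if pmIsUser line then d.insert "username" (pmField line)
  else if PySem.Str.isIn "Domain" line && PySem.Str.isIn ":" line then
    d.insert "domain" (pmField line)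
  else if PySem.Str.isIn "NTLM" line && PySem.Str.isIn ":" line then
    d.insert "ntlm" (pmField line)
  else if PySem.Str.isIn "Password" line && PySem.Str.isIn ":" line then
    pmPwdIf d (pmField line)
  else d

def pmBuild (block : List String) : PySem.Dict String String :=
  block.foldl pmBuildStep PySem.Dict.empty

def parse_mimikatz_output_py_alt (output : String) : List (List (String × String)) :=
  let lines := (pmSplit output "\n").map PySem.Str.strip
  let st := lines.foldl pmBlockStep ([], [])
  let blocks := st.1 ++ [st.2]
  let lead := pmBuild (blocks.headD [])
  ((if lead.items = [] then [] else [lead]) ++ blocks.tail.map pmBuild).map PySem.Dict.items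

-- ===== PRECONDITION & SPEC =====
def Spec_parse_mimikatz_output_py (output : String) (out : List (List (String × String))) : Prop := out = parse_mimikatz_output_py_alt output
instance (output : String) (out : List (List (String × String))) : Decidable (Spec_parse_mimikatz_output_py output out) := by unfold Spec_parse_mimikatz_output_py; infer_instance

-- ===== CLAIM (what is proved, stated in full; the proofs are below) =====
def Claim_equal_parse_mimikatz_output_py : Prop := ∀ (output : String), Dom_parse_mimikatz_output_py output → Spec_parse_mimikatz_output_py output (parse_mimikatz_output_py output)

-- ===== LEMMAS AND PROOFS =====

-- emission of one finished block, as A performs it ('if current_cred: creds.append(...)')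
def pmEmit (b : List String) : List (PySem.Dict String String) :=
  if (pmBuild b).items = [] then [] else [pmBuild b]

lemma pmBuild_append (b : List String) (l : String) :
    pmBuild (b ++ [l]) = pmBuildStep (pmBuild b) l := by
  simp [pmBuild, List.foldl_append]

lemma pmBuild_single_user (l : String) (h : pmIsUser l = true) :
    pmBuild [l] = PySem.Dict.insert PySem.Dict.empty "username" (pmField l) := by
  show pmBuildStep PySem.Dict.empty l = _
  unfold pmBuildStep
  rw [if_pos h]

-- the block-partition fold only appends to its first component
lemma pmBlocks_prefix (lines : List String) (done : List (List String)) (cur : List String) :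
    lines.foldl pmBlockStep (done, cur) =
      (done ++ (lines.foldl pmBlockStep ([], cur)).1, (lines.foldl pmBlockStep ([], cur)).2) := by
  induction lines generalizing done cur with
  | nil => simp
  | cons l rest ih =>
    simp only [List.foldl_cons, pmBlockStep]
    by_cases h : pmIsUser l = true
    · simp only [h, if_pos, List.nil_append]
      rw [ih (done ++ [cur]) [l], ih [cur] [l]]
      simp
    · simp only [h, Bool.false_eq_true, if_false]
      exact ih done (cur ++ [l])

-- inserting never empties a dict
lemma items_insert_ne_nil (d : PySem.Dict String String) (k v : String) :
    (d.insert k v).items ≠ [] := by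
  obtain ⟨its⟩ := d
  rw [PySem.Dict.items_insert]
  cases its <;> split <;> simp_all

lemma pmBuildStep_ne_nil (d : PySem.Dict String String) (l : String)
    (h : d.items ≠ []) : (pmBuildStep d l).items ≠ [] := by
  unfold pmBuildStep pmPwdIf
  split_ifs <;> first | exact items_insert_ne_nil _ _ _ | exact h

lemma pmBuild_foldl_ne_nil (b : List String) (d : PySem.Dict String String)
    (h : d.items ≠ []) : (b.foldl pmBuildStep d).items ≠ [] := by
  induction b generalizing d with
  | nil => exact h
  | cons l rest ih => exact ih _ (pmBuildStep_ne_nil d l h)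

-- a block headed by a Username line builds a non-empty dict
lemma pmBuild_user_ne_nil (u : String) (t : List String) (hu : pmIsUser u = true) :
    (pmBuild (u :: t)).items ≠ [] := by
  show ((u :: t).foldl pmBuildStep PySem.Dict.empty).items ≠ []
  rw [List.foldl_cons]
  exact pmBuild_foldl_ne_nil t _
    (by rw [show pmBuildStep PySem.Dict.empty u = _ from pmBuild_single_user u hu]
        exact items_insert_ne_nil _ _ _)

-- predicate: a block starts with a Username line
def pmUserHeaded (b : List String) : Prop := ∃ u t, b = u :: t ∧ pmIsUser u = true

-- starting from a Username-headed current block, every produced block is Username-headed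
lemma pmBlocks_user_headed (lines : List String) (u : String) (t : List String)
    (hu : pmIsUser u = true) :
    (∀ b ∈ (lines.foldl pmBlockStep ([], u :: t)).1, pmUserHeaded b) ∧
      pmUserHeaded (lines.foldl pmBlockStep ([], u :: t)).2 := by
  induction lines generalizing u t with
  | nil => exact ⟨by simp, u, t, rfl, hu⟩
  | cons l rest ih =>
    simp only [List.foldl_cons, pmBlockStep]
    by_cases h : pmIsUser l = true
    · simp only [h, if_pos, List.nil_append]
      rw [pmBlocks_prefix rest [u :: t] [l]]
      obtain ⟨h1, h2⟩ := ih l [] h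
      refine ⟨?_, h2⟩
      intro b hb
      rcases List.mem_append.mp hb with hb | hb
      · simp only [List.mem_singleton] at hb; exact hb ▸ ⟨u, t, rfl, hu⟩
      · exact h1 b hb
    · simp only [h, Bool.false_eq_true, if_false]
      exact ih u (t ++ [l]) hu

-- shape of the produced blocks: either no Username line occurred (no finished block),
-- or every block after the leading one is Username-headed
lemma pmBlocks_shape (lines : List String) (cur : List String) :
    (lines.foldl pmBlockStep ([], cur)).1 = [] ∨
      ((∀ b ∈ (lines.foldl pmBlockStep ([], cur)).1.tail, pmUserHeaded b) ∧
        pmUserHeaded (lines.foldl pmBlockStep ([], cur)).2) := by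
  induction lines generalizing cur with
  | nil => exact Or.inl rfl
  | cons l rest ih =>
    simp only [List.foldl_cons, pmBlockStep]
    by_cases h : pmIsUser l = true
    · simp only [h, if_pos, List.nil_append]
      rw [pmBlocks_prefix rest [cur] [l]]
      obtain ⟨h1, h2⟩ := pmBlocks_user_headed rest l [] h
      exact Or.inr ⟨by simpa using h1, h2⟩
    · simp only [h, Bool.false_eq_true, if_false]
      exact ih (cur ++ [l])

-- the elif chain of A on a non-Username line is exactly B's build step
lemma pmStepACore_not_user (a : List (PySem.Dict String String))
    (d : PySem.Dict String String) (l : String) (h : pmIsUser l = false) :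
    pmStepACore (a, d) l = (a, pmBuildStep d l) := by
  have h' : (PySem.Str.isIn "Username" l && PySem.Str.isIn ":" l) = false := h
  simp only [pmStepACore, pmBuildStep, pmIsUser, h', Bool.false_eq_true, if_false]
  split_ifs <;> rfl

-- the step of A on a Username line: emit the current dict if non-empty, restart
lemma pmStepACore_user (creds : List (PySem.Dict String String)) (cur : List String)
    (l : String) (h : pmIsUser l = true) :
    pmStepACore (creds, pmBuild cur) l = (creds ++ pmEmit cur, pmBuild [l]) := by
  have h' : (PySem.Str.isIn "Username" l && PySem.Str.isIn ":" l) = true := h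
  unfold pmStepACore
  rw [if_pos h', pmBuild_single_user l h]
  unfold pmEmit
  split_ifs <;> simp

-- MAIN INVARIANT: A's fold over the stripped lines, started with the current block's dict,
-- equals the emissions of the finished blocks plus the build of the current block.
lemma pmMain (lines : List String) (creds : List (PySem.Dict String String)) (cur : List String) :
    lines.foldl pmStepACore (creds, pmBuild cur) =
      (creds ++ ((lines.foldl pmBlockStep ([], cur)).1).flatMap pmEmit,
       pmBuild (lines.foldl pmBlockStep ([], cur)).2) := by
  induction lines generalizing creds cur with
  | nil => simp
  | cons l rest ih =>
    simp only [List.foldl_cons]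
    by_cases h : pmIsUser l = true
    · rw [pmStepACore_user creds cur l h, ih (creds ++ pmEmit cur) [l]]
      simp only [pmBlockStep, h, if_pos, List.nil_append]
      rw [pmBlocks_prefix rest [cur] [l]]
      simp
    · have hf : pmIsUser l = false := by simpa using h
      rw [pmStepACore_not_user creds (pmBuild cur) l hf, ← pmBuild_append,
        ih creds (cur ++ [l])]
      simp only [pmBlockStep, hf, Bool.false_eq_true, if_false]

-- bridge: A's fold (strip inside) over raw lines = the core fold over stripped lines
lemma pmFoldA_strip (raw : List String)
    (st : List (PySem.Dict String String) × PySem.Dict String String) :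
    raw.foldl pmStepA st = (raw.map PySem.Str.strip).foldl pmStepACore st := by
  rw [List.foldl_map]
  rfl

-- on Username-headed blocks, emission is unconditional
lemma flatMap_pmEmit_eq_map (bs : List (List String)) (h : ∀ b ∈ bs, pmUserHeaded b) :
    bs.flatMap pmEmit = bs.map pmBuild := by
  induction bs with
  | nil => rfl
  | cons b rest ih =>
    obtain ⟨u, t, rfl, hu⟩ := h b (by simp)
    simp only [List.flatMap_cons, List.map_cons]
    rw [ih (fun b hb => h b (by simp [hb]))]
    unfold pmEmit
    rw [if_neg (pmBuild_user_ne_nil u t hu)]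
    simp

-- final assembly: A's emissions over the blocks D ++ [C] equal B's head/tail emission
lemma pmFinal (D : List (List String)) (C : List String)
    (hshape : D = [] ∨ ((∀ b ∈ D.tail, pmUserHeaded b) ∧ pmUserHeaded C)) :
    ((if (pmBuild C).items = [] then D.flatMap pmEmit
      else D.flatMap pmEmit ++ [pmBuild C]).map PySem.Dict.items) =
    (((if (pmBuild ((D ++ [C]).headD [])).items = []
        then [] else [pmBuild ((D ++ [C]).headD [])]) ++
      (D ++ [C]).tail.map pmBuild).map PySem.Dict.items) := by
  have hA : (if (pmBuild C).items = [] then D.flatMap pmEmit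
             else D.flatMap pmEmit ++ [pmBuild C]) = D.flatMap pmEmit ++ pmEmit C := by
    unfold pmEmit; split_ifs <;> simp
  rw [hA]
  cases D with
  | nil => simp [pmEmit]
  | cons b0 ds =>
    rcases hshape with h | ⟨h1, h2⟩
    · cases h
    · obtain ⟨u, t, hCt, hu⟩ := h2
      have hEC : pmEmit C = [pmBuild C] := by
        unfold pmEmit; rw [if_neg (hCt ▸ pmBuild_user_ne_nil u t hu)]
      simp only [List.flatMap_cons, List.cons_append, List.headD_cons, List.tail_cons]
      rw [flatMap_pmEmit_eq_map ds (by simpa using h1), hEC]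
      simp [pmEmit]

-- ===== VERDICT (by name: the statement is the Claim_ definition above) =====
theorem parse_mimikatz_output_py_spec : Claim_equal_parse_mimikatz_output_py := by
  intro output _
  unfold Spec_parse_mimikatz_output_py parse_mimikatz_output_py parse_mimikatz_output_py_alt
  rw [pmFoldA_strip]
  rw [show PySem.Dict.empty = pmBuild ([] : List String) from rfl,
    pmMain ((pmSplit output "\n").map PySem.Str.strip) [] []]
  simp only [List.nil_append]
  exact pmFinal _ _ (pmBlocks_shape _ [])
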